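-- pv_equiv track=rewrite | github.com/Rhyankwon/algorithms | programmers/n2배열 자르기.py | solution
-- ===== SOURCE A (Python) =====
-- def solution(n, left, right):
--     answer = []
--     left_row, left_col = left//n, left%n
--     right_row, right_col = right//n, right%n
--     for i in range(left_row, right_row+1):
--         for j in range(n):
--             if left_row == right_row: #예외처리
--                 if right_col >= j >= left_col:
--                     if j <= left_row:
--                         answer.append(left_row+1)
--                     else :
--                         answer.append(j+1)
--             else:
--                 if i == left_row:
--                     if j >= left_col:
--                         if j <= left_row:
--                             answer.append(left_row+1)
--                         else :
--                             answer.append(j+1)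
--                 elif i == right_row:
--                     if j <= right_col:
--                         if j <= right_row:
--                             answer.append(right_row+1)
--                         else :
--                             answer.append(j+1)
--                 else :
--                     if j <= i:
--                         answer.append(i+1)
--                     else :
--                         answer.append(j+1)
--     return answer
-- ===== SOURCE B (Python) =====
-- def solution(n, left, right):
--     return [max(k // n, k % n) + 1 for k in range(left, right + 1)]
-- ===== Notes on version B (the rewrite author's own statement) =====
-- stated objective: simpler
-- what changed: Replaces the row-by-row double loop over whole matrix rows (with four positional branch cases) by a single comprehension over k in [left, right] using the closed-form cell value max(k//n, k%n)+1.
-- outside the precondition, e.g. on solution(-1, 0, 2): A returns [], B returns [1, 1, 1]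
import Mathlib
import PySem

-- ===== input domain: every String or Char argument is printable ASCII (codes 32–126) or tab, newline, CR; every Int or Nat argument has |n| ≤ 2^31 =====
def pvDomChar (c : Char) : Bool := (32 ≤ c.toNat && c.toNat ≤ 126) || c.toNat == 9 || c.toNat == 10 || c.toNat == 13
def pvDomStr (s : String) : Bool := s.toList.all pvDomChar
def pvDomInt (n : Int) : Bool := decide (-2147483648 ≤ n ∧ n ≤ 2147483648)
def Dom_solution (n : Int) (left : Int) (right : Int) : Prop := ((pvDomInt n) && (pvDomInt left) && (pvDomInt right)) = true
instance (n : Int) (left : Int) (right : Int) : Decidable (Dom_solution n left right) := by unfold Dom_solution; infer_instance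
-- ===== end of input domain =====

-- B replaces A's row-by-row double loop (four positional branch cases) by one pass over
-- k ∈ [left, right] with the closed-form cell value max(k//n, k%n)+1 (objective: simpler).

-- ===== PORT A =====
def solution (n : Int) (left : Int) (right : Int) : List Int :=
  let leftRow := PySem.Int.floordiv left n
  let leftCol := PySem.Int.mod left n
  let rightRow := PySem.Int.floordiv right n
  let rightCol := PySem.Int.mod right n
  (PySem.List.pyRange leftRow (rightRow + 1)).foldl (fun answer i =>
    (PySem.List.pyRange 0 n).foldl (fun answer j =>
      if leftRow = rightRow then
        if rightCol ≥ j ∧ j ≥ leftCol then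
          if j ≤ leftRow then answer ++ [leftRow + 1] else answer ++ [j + 1]
        else answer
      else
        if i = leftRow then
          if j ≥ leftCol then
            if j ≤ leftRow then answer ++ [leftRow + 1] else answer ++ [j + 1]
          else answer
        else if i = rightRow then
          if j ≤ rightCol then
            if j ≤ rightRow then answer ++ [rightRow + 1] else answer ++ [j + 1]
          else answer
        else
          if j ≤ i then answer ++ [i + 1] else answer ++ [j + 1]
    ) answer) []

-- ===== PORT B =====
def solution_alt (n : Int) (left : Int) (right : Int) : List Int :=
  (PySem.List.pyRange left (right + 1)).map
    (fun k => max (PySem.Int.floordiv k n) (PySem.Int.mod k n) + 1)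

-- ===== PRECONDITION & SPEC =====
-- Pre_ restricts to the natural n×n-matrix domain n ≥ 1: at n = 0 A raises ZeroDivisionError,
-- and for n ≤ -1 (no n×n matrix exists) A's empty inner range accidentally yields [].
def Pre_solution (n : Int) (left : Int) (right : Int) : Prop := 1 ≤ n
instance (n : Int) (left : Int) (right : Int) : Decidable (Pre_solution n left right) := by
  unfold Pre_solution; infer_instance

def pvWitness_solution : Int × Int × Int := (3, 2, 5)

def Spec_solution (n : Int) (left : Int) (right : Int) (out : List Int) : Prop := out = solution_alt n left right
instance (n : Int) (left : Int) (right : Int) (out : List Int) : Decidable (Spec_solution n left right out) := by unfold Spec_solution; infer_instance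

-- ===== CLAIM (what is proved, stated in full; the proofs are below) =====
def Claim_equal_solution : Prop := ∀ (n : Int) (left : Int) (right : Int), Dom_solution n left right → Pre_solution n left right → Spec_solution n left right (solution n left right)

-- ===== LEMMAS AND PROOFS =====

-- pyRange with default step 1 is empty when the bounds are reversed.
theorem pvRangeNil {a b : Int} (h : b ≤ a) : PySem.List.pyRange a b = [] := by
  rw [List.eq_nil_iff_forall_not_mem]
  intro x hx
  rw [PySem.List.mem_pyRange_one] at hx
  omega

-- filtering a contiguous range by an interval condition gives the clipped range
theorem pvFilt : ∀ (len : Nat) (lo a b : Int),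
    (PySem.List.pyRange lo (lo + (len : Int))).filter (fun j => decide (a ≤ j ∧ j ≤ b))
      = PySem.List.pyRange (max lo a) (min (lo + (len : Int)) (b + 1)) := by
  intro len
  induction len with
  | zero =>
      intro lo a b
      rw [pvRangeNil (by omega), pvRangeNil (by omega)]
      rfl
  | succ m ih =>
      intro lo a b
      rw [show lo + ((m + 1 : Nat) : Int) = (lo + 1) + (m : Int) by push_cast; ring]
      rw [PySem.List.pyRange_one_cons (show lo < (lo + 1) + (m : Int) by omega)]
      by_cases hin : a ≤ lo ∧ lo ≤ b
      · rw [List.filter_cons_of_pos (by simpa using hin), ih (lo + 1) a b]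
        rw [show max (lo + 1) a = lo + 1 by omega]
        rw [PySem.List.pyRange_one_cons
          (show max lo a < min ((lo + 1) + (m : Int)) (b + 1) by omega)]
        rw [show max lo a = lo by omega]
      · rw [List.filter_cons_of_neg (by simpa using hin), ih (lo + 1) a b]
        by_cases ha : a ≤ lo
        · rw [pvRangeNil (by omega), pvRangeNil (by omega)]
        · rw [show max (lo + 1) a = max lo a by omega]

-- a shifted range is the map of the shift over the base range
theorem pvShiftAux (c : Int) : ∀ (len : Nat) (a : Int),
    PySem.List.pyRange (c + a) ((c + a) + (len : Int))
      = (PySem.List.pyRange a (a + (len : Int))).map (fun j => c + j) := by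
  intro len
  induction len with
  | zero => intro a; rw [pvRangeNil (by omega), pvRangeNil (by omega)]; rfl
  | succ m ih =>
      intro a
      rw [show a + ((m + 1 : Nat) : Int) = (a + 1) + (m : Int) by push_cast; ring]
      rw [show (c + a) + ((m + 1 : Nat) : Int) = (c + (a + 1)) + (m : Int) by push_cast; ring]
      rw [PySem.List.pyRange_one_cons (show a < (a + 1) + (m : Int) by omega)]
      rw [PySem.List.pyRange_one_cons (show c + a < (c + (a + 1)) + (m : Int) by omega)]
      rw [List.map_cons, show c + a + 1 = c + (a + 1) by ring, ih (a + 1)]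

theorem pvShift (c a b : Int) :
    PySem.List.pyRange (c + a) (c + b) = (PySem.List.pyRange a b).map (fun j => c + j) := by
  by_cases h : a ≤ b
  · have hb : b = a + ((b - a).toNat : Int) := by omega
    have h2 := pvShiftAux c (b - a).toNat a
    rw [show (c + a) + (((b - a).toNat : Nat) : Int) = c + (a + ((b - a).toNat : Int)) by ring] at h2
    rw [hb]
    exact h2
  · rw [pvRangeNil (by omega), pvRangeNil (by omega)]; rfl

-- closed-form value of a row segment: the cell value at k = i*n + j (0 ≤ j < n) is max(i,j)+1
theorem pvCore {n : Int} (hn : 0 < n) (i a b : Int) (h0 : 0 ≤ a) (hb : b ≤ n - 1) :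
    (PySem.List.pyRange a (b + 1)).map (fun j => if j ≤ i then i + 1 else j + 1)
      = (PySem.List.pyRange (i * n + a) (i * n + (b + 1))).map
          (fun k => max (PySem.Int.floordiv k n) (PySem.Int.mod k n) + 1) := by
  rw [pvShift (i * n) a (b + 1), List.map_map]
  apply List.map_congr_left
  intro j hj
  rw [PySem.List.mem_pyRange_one] at hj
  have hd : PySem.Int.floordiv (i * n + j) n = i := by
    rw [PySem.Int.floordiv_eq_iff_of_pos hn]
    constructor
    · linarith [hj.1]
    · have he : (i + 1) * n = i * n + n := by ring
      rw [he]
      linarith [hj.2, hb]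
  have hm : PySem.Int.mod (i * n + j) n = j := by
    have h := PySem.Int.floordiv_mul_add_mod (i * n + j) n
    rw [hd] at h
    linarith
  simp only [Function.comp_apply]
  rw [hd, hm]
  split_ifs <;> omega

-- the canonical inner-loop body every branch of A's inner loop reduces to
def pvCanon (i a b : Int) : List Int → Int → List Int := fun answer j =>
  if a ≤ j ∧ j ≤ b then answer ++ [if j ≤ i then i + 1 else j + 1] else answer

theorem pvInner {n : Int} (hn : 0 < n) (i a b : Int) (h0 : 0 ≤ a) (hb : b ≤ n - 1)
    (acc : List Int) :
    (PySem.List.pyRange 0 n).foldl (pvCanon i a b) acc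
      = acc ++ (PySem.List.pyRange (i * n + a) (i * n + (b + 1))).map
          (fun k => max (PySem.Int.floordiv k n) (PySem.Int.mod k n) + 1) := by
  unfold pvCanon
  rw [PySem.List.foldl_append_ite (fun j => a ≤ j ∧ j ≤ b)
    (fun j => if j ≤ i then i + 1 else j + 1) (PySem.List.pyRange 0 n) acc]
  have hfil := pvFilt n.toNat 0 a b
  rw [show (0 : Int) + ((n.toNat : Nat) : Int) = n by omega] at hfil
  rw [hfil, show max (0 : Int) a = a by omega, show min n (b + 1) = b + 1 by omega]
  rw [pvCore hn i a b h0 hb]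

-- gluing the per-row segments [st,(i0+1)n), [i·n,(i+1)n), …, [(i0+m)n, fin) into [st, fin)
theorem pvGlue {n : Int} (hn : 0 < n) : ∀ (m : Nat) (i0 st fin : Int),
    i0 * n ≤ st → st ≤ (i0 + 1) * n → (i0 + (m : Int)) * n ≤ fin → fin ≤ (i0 + (m : Int) + 1) * n →
    (PySem.List.pyRange i0 (i0 + (m : Int) + 1)).flatMap
        (fun i => PySem.List.pyRange (if i = i0 then st else i * n)
                                     (if i = i0 + (m : Int) then fin else (i + 1) * n))
      = PySem.List.pyRange st fin := by
  intro m
  induction m with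
  | zero =>
      intro i0 st fin h1 h2 h3 h4
      rw [PySem.List.pyRange_one_cons (show i0 < i0 + ((0 : Nat) : Int) + 1 by push_cast; omega)]
      rw [pvRangeNil (show i0 + ((0 : Nat) : Int) + 1 ≤ i0 + 1 by push_cast; omega)]
      rw [List.flatMap_cons, List.flatMap_nil, List.append_nil]
      rw [if_pos rfl, if_pos (show i0 = i0 + ((0 : Nat) : Int) by push_cast; omega)]
  | succ m ih =>
      intro i0 st fin h1 h2 h3 h4
      have hmono : ∀ p q : Int, p ≤ q → p * n ≤ q * n := fun p q h =>
        mul_le_mul_of_nonneg_right h (le_of_lt hn)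
      rw [PySem.List.pyRange_one_cons
        (show i0 < i0 + ((m + 1 : Nat) : Int) + 1 by push_cast; omega)]
      rw [List.flatMap_cons, if_pos rfl,
        if_neg (show i0 ≠ i0 + ((m + 1 : Nat) : Int) by push_cast; omega)]
      have hcong : (PySem.List.pyRange (i0 + 1) (i0 + ((m + 1 : Nat) : Int) + 1)).flatMap
          (fun i => PySem.List.pyRange (if i = i0 then st else i * n)
                                       (if i = i0 + ((m + 1 : Nat) : Int) then fin else (i + 1) * n))
          = (PySem.List.pyRange (i0 + 1) (i0 + ((m + 1 : Nat) : Int) + 1)).flatMap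
          (fun i => PySem.List.pyRange (if i = i0 + 1 then (i0 + 1) * n else i * n)
                                       (if i = (i0 + 1) + (m : Int) then fin else (i + 1) * n)) := by
        apply List.flatMap_congr
        intro i hi
        rw [PySem.List.mem_pyRange_one] at hi
        have e1 : (if i = i0 then st else i * n)
            = (if i = i0 + 1 then (i0 + 1) * n else i * n) := by
          rw [if_neg (show i ≠ i0 by omega)]
          by_cases h : i = i0 + 1
          · rw [if_pos h, h]
          · rw [if_neg h]
        have e2 : (if i = i0 + ((m + 1 : Nat) : Int) then fin else (i + 1) * n)
            = (if i = (i0 + 1) + (m : Int) then fin else (i + 1) * n) := by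
          by_cases h : i = i0 + ((m + 1 : Nat) : Int)
          · rw [if_pos h, if_pos (by push_cast at h ⊢; omega)]
          · rw [if_neg h, if_neg (by push_cast at h ⊢; omega)]
        rw [e1, e2]
      rw [hcong]
      have hrec : (PySem.List.pyRange (i0 + 1) ((i0 + 1) + (m : Int) + 1)).flatMap
          (fun i => PySem.List.pyRange (if i = i0 + 1 then (i0 + 1) * n else i * n)
                                       (if i = (i0 + 1) + (m : Int) then fin else (i + 1) * n))
          = PySem.List.pyRange ((i0 + 1) * n) fin := by
        apply ih (i0 + 1) ((i0 + 1) * n) fin (le_refl _) (hmono _ _ (by omega))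
        · rw [show (i0 + 1) + (m : Int) = i0 + ((m + 1 : Nat) : Int) by push_cast; ring]
          exact h3
        · rw [show (i0 + 1) + (m : Int) + 1 = i0 + ((m + 1 : Nat) : Int) + 1 by push_cast; ring]
          exact h4
      rw [show i0 + ((m + 1 : Nat) : Int) + 1 = (i0 + 1) + (m : Int) + 1 by push_cast; ring]
      rw [hrec]
      exact (PySem.List.pyRange_one_append st ((i0 + 1) * n) fin h2
        (le_trans (hmono _ _ (by push_cast; omega)) h3)).symm

-- one row of A's double loop equals the mapped closed-form over that row's k-segment
theorem pvRow {n : Int} (hn : 0 < n) (left right lr lc rr rc : Int)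
    (hlr : lr = PySem.Int.floordiv left n) (hlc : lc = PySem.Int.mod left n)
    (hrr : rr = PySem.Int.floordiv right n) (hrc : rc = PySem.Int.mod right n)
    (i : Int) (hi1 : lr ≤ i) (hi2 : i ≤ rr) (acc : List Int) :
    (PySem.List.pyRange 0 n).foldl (fun answer j =>
      if lr = rr then
        if rc ≥ j ∧ j ≥ lc then
          if j ≤ lr then answer ++ [lr + 1] else answer ++ [j + 1]
        else answer
      else
        if i = lr then
          if j ≥ lc then
            if j ≤ lr then answer ++ [lr + 1] else answer ++ [j + 1]
          else answer
        else if i = rr then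
          if j ≤ rc then
            if j ≤ rr then answer ++ [rr + 1] else answer ++ [j + 1]
          else answer
        else
          if j ≤ i then answer ++ [i + 1] else answer ++ [j + 1]) acc
      = acc ++ (PySem.List.pyRange (if i = lr then left else i * n)
                                   (if i = rr then right + 1 else (i + 1) * n)).map
          (fun k => max (PySem.Int.floordiv k n) (PySem.Int.mod k n) + 1) := by
  have hL : lr * n + lc = left := by rw [hlr, hlc]; exact PySem.Int.floordiv_mul_add_mod left n
  have hR : rr * n + rc = right := by rw [hrr, hrc]; exact PySem.Int.floordiv_mul_add_mod right n
  have hlc0 : 0 ≤ lc := hlc ▸ PySem.Int.mod_nonneg left hn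
  have hlcn : lc < n := hlc ▸ PySem.Int.mod_lt left hn
  have hrc0 : 0 ≤ rc := hrc ▸ PySem.Int.mod_nonneg right hn
  have hrcn : rc < n := hrc ▸ PySem.Int.mod_lt right hn
  have hone : ∀ (acc' : List Int), ∀ j ∈ PySem.List.pyRange 0 n,
      (fun answer j =>
        if lr = rr then
          if rc ≥ j ∧ j ≥ lc then
            if j ≤ lr then answer ++ [lr + 1] else answer ++ [j + 1]
          else answer
        else
          if i = lr then
            if j ≥ lc then
              if j ≤ lr then answer ++ [lr + 1] else answer ++ [j + 1]
            else answer
          else if i = rr then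
            if j ≤ rc then
              if j ≤ rr then answer ++ [rr + 1] else answer ++ [j + 1]
            else answer
          else
            if j ≤ i then answer ++ [i + 1] else answer ++ [j + 1]) acc' j
      = pvCanon i (if i = lr then lc else 0) (if i = rr then rc else n - 1) acc' j := by
    intro acc' j hj
    rw [PySem.List.mem_pyRange_one] at hj
    simp only [pvCanon]
    by_cases hsame : lr = rr
    · have hil : i = lr := by omega
      have hir : i = rr := by omega
      rw [if_pos hsame, if_pos hil, if_pos hir, hil]
      split_ifs <;> first | rfl | (exfalso; omega)
    · rw [if_neg hsame]
      by_cases hil : i = lr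
      · rw [if_pos hil, if_pos hil, if_neg (show i ≠ rr by omega), hil]
        split_ifs <;> first | rfl | (exfalso; omega)
      · rw [if_neg hil, if_neg hil]
        by_cases hir : i = rr
        · rw [if_pos hir, if_pos hir, hir]
          split_ifs <;> first | rfl | (exfalso; omega)
        · rw [if_neg hir, if_neg hir]
          split_ifs <;> first | rfl | (exfalso; omega)
  rw [PySem.List.foldl_congr_mem _ _ _ acc hone]
  rw [pvInner hn i (if i = lr then lc else 0) (if i = rr then rc else n - 1)
    (by split_ifs <;> omega) (by split_ifs <;> omega) acc]
  rw [show i * n + (if i = lr then lc else 0) = (if i = lr then left else i * n) by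
    by_cases hil : i = lr
    · rw [if_pos hil, if_pos hil, hil]; linarith [hL]
    · rw [if_neg hil, if_neg hil]; ring]
  rw [show i * n + ((if i = rr then rc else n - 1) + 1) = (if i = rr then right + 1 else (i + 1) * n) by
    by_cases hir : i = rr
    · rw [if_pos hir, if_pos hir, hir]; linarith [hR]
    · rw [if_neg hir, if_neg hir]; ring]

-- A's whole double loop (zeta-reduced) equals B
theorem pvMain (n left right : Int) (hn : 0 < n) :
    (PySem.List.pyRange (PySem.Int.floordiv left n) (PySem.Int.floordiv right n + 1)).foldl
      (fun answer i =>
        (PySem.List.pyRange 0 n).foldl (fun answer j =>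
          if PySem.Int.floordiv left n = PySem.Int.floordiv right n then
            if PySem.Int.mod right n ≥ j ∧ j ≥ PySem.Int.mod left n then
              if j ≤ PySem.Int.floordiv left n then answer ++ [PySem.Int.floordiv left n + 1]
              else answer ++ [j + 1]
            else answer
          else
            if i = PySem.Int.floordiv left n then
              if j ≥ PySem.Int.mod left n then
                if j ≤ PySem.Int.floordiv left n then answer ++ [PySem.Int.floordiv left n + 1]
                else answer ++ [j + 1]
              else answer
            else if i = PySem.Int.floordiv right n then
              if j ≤ PySem.Int.mod right n then
                if j ≤ PySem.Int.floordiv right n then answer ++ [PySem.Int.floordiv right n + 1]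
                else answer ++ [j + 1]
              else answer
            else
              if j ≤ i then answer ++ [i + 1] else answer ++ [j + 1]
        ) answer) []
    = solution_alt n left right := by
  set lr := PySem.Int.floordiv left n with hlr
  set lc := PySem.Int.mod left n with hlc
  set rr := PySem.Int.floordiv right n with hrr
  set rc := PySem.Int.mod right n with hrc
  have hL : lr * n + lc = left := by rw [hlr, hlc]; exact PySem.Int.floordiv_mul_add_mod left n
  have hR : rr * n + rc = right := by rw [hrr, hrc]; exact PySem.Int.floordiv_mul_add_mod right n
  have hlc0 : 0 ≤ lc := hlc ▸ PySem.Int.mod_nonneg left hn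
  have hlcn : lc < n := hlc ▸ PySem.Int.mod_lt left hn
  have hrc0 : 0 ≤ rc := hrc ▸ PySem.Int.mod_nonneg right hn
  have hrcn : rc < n := hrc ▸ PySem.Int.mod_lt right hn
  by_cases hord : rr < lr
  · rw [pvRangeNil (show rr + 1 ≤ lr by omega)]
    have hmul : (rr + 1) * n ≤ lr * n := mul_le_mul_of_nonneg_right (by omega) (le_of_lt hn)
    have hrw : (rr + 1) * n = rr * n + n := by ring
    rw [List.foldl_nil]
    unfold solution_alt
    rw [pvRangeNil (show right + 1 ≤ left by linarith)]
    rfl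
  · rw [not_lt] at hord
    obtain ⟨m, hm⟩ : ∃ m : Nat, rr = lr + (m : Int) := ⟨(rr - lr).toNat, by omega⟩
    have houter : ∀ (acc : List Int), ∀ i ∈ PySem.List.pyRange lr (rr + 1),
        (fun answer i =>
          (PySem.List.pyRange 0 n).foldl (fun answer j =>
            if lr = rr then
              if rc ≥ j ∧ j ≥ lc then
                if j ≤ lr then answer ++ [lr + 1] else answer ++ [j + 1]
              else answer
            else
              if i = lr then
                if j ≥ lc then
                  if j ≤ lr then answer ++ [lr + 1] else answer ++ [j + 1]
                else answer
              else if i = rr then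
                if j ≤ rc then
                  if j ≤ rr then answer ++ [rr + 1] else answer ++ [j + 1]
                else answer
              else
                if j ≤ i then answer ++ [i + 1] else answer ++ [j + 1]
          ) answer) acc i
        = (fun (acc : List Int) (i : Int) =>
            acc ++ (PySem.List.pyRange (if i = lr then left else i * n)
                                       (if i = rr then right + 1 else (i + 1) * n)).map
              (fun k => max (PySem.Int.floordiv k n) (PySem.Int.mod k n) + 1)) acc i := by
      intro acc i hi
      rw [PySem.List.mem_pyRange_one] at hi
      exact pvRow hn left right lr lc rr rc hlr hlc hrr hrc i hi.1 (by omega) acc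
    rw [PySem.List.foldl_congr_mem _ _ _ [] houter]
    rw [PySem.List.foldl_append_eq_flatMap
      (fun i => (PySem.List.pyRange (if i = lr then left else i * n)
                                    (if i = rr then right + 1 else (i + 1) * n)).map
        (fun k => max (PySem.Int.floordiv k n) (PySem.Int.mod k n) + 1))
      (PySem.List.pyRange lr (rr + 1)) []]
    rw [List.nil_append]
    have hsplit : List.flatMap
        (fun i => (PySem.List.pyRange (if i = lr then left else i * n)
                                      (if i = rr then right + 1 else (i + 1) * n)).map
          (fun k => max (PySem.Int.floordiv k n) (PySem.Int.mod k n) + 1))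
        (PySem.List.pyRange lr (rr + 1))
        = List.map (fun k => max (PySem.Int.floordiv k n) (PySem.Int.mod k n) + 1)
          (List.flatMap
            (fun i => PySem.List.pyRange (if i = lr then left else i * n)
                                         (if i = rr then right + 1 else (i + 1) * n))
            (PySem.List.pyRange lr (rr + 1))) := List.map_flatMap.symm
    rw [hsplit]
    have hglue : List.flatMap
        (fun i => PySem.List.pyRange (if i = lr then left else i * n)
                                     (if i = rr then right + 1 else (i + 1) * n))
        (PySem.List.pyRange lr (rr + 1))
        = PySem.List.pyRange left (right + 1) := by
      rw [hm]
      apply pvGlue hn m lr left (right + 1)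
      · linarith
      · have h : (lr + 1) * n = lr * n + n := by ring
        linarith
      · have h : (lr + (m : Int)) * n = rr * n := by rw [hm]
        linarith
      · have h : (lr + (m : Int) + 1) * n = rr * n + n := by rw [hm]; ring
        linarith
    rw [hglue]
    rfl

-- ===== VERDICT (by name: the statement is the Claim_ definition above) =====
theorem solution_spec : Claim_equal_solution := by
  intro n left right _ hpre
  unfold Pre_solution at hpre
  unfold Spec_solution
  exact pvMain n left right (by omega)
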